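-- pv_equiv track=rewrite | github.com/SafalNarsingh/Python-Beginner-Projects | project1.py | winner_finder
-- ===== SOURCE A (Python) =====
-- def winner_finder(players_score,players_no):
--     '''
--      This is the third function used in this code.
--      Here, the highest scorer index is found using a simple logic
--      if the score of any players are same then the variable count is increased
--      if count is equal to no.of players-1 then it means the game resulted in a draw so -1 is returned to the calling function
--      else the highest scorer index is returned
--     '''
--     highest_score = 0
--     count = 0
--
--     for i in range(1,players_no):
--         if(players_score[highest_score]==players_score[i]):
--             count += 1
--         elif(players_score[highest_score]<players_score[i]):
--             highest_score = i
--
--     if(count == players_no-1):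
--         return -1
--     else:
--         return highest_score
-- ===== SOURCE B (Python) =====
-- def winner_finder(players_score, players_no):
--     if players_no < 1:
--         return 0
--     if all(players_score[i] == players_score[0] for i in range(1, players_no)):
--         return -1
--     m = max(players_score[i] for i in range(players_no))
--     return next(i for i in range(players_no) if players_score[i] == m)
-- ===== Notes on version B (the rewrite author's own statement) =====
-- stated objective: simpler
-- what changed: A's single path-dependent loop carrying a running-max index and a tie counter is replaced by distinct builtin passes: an all-equal test for the draw case, then max() and the first index attaining it.
import Mathlib
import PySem

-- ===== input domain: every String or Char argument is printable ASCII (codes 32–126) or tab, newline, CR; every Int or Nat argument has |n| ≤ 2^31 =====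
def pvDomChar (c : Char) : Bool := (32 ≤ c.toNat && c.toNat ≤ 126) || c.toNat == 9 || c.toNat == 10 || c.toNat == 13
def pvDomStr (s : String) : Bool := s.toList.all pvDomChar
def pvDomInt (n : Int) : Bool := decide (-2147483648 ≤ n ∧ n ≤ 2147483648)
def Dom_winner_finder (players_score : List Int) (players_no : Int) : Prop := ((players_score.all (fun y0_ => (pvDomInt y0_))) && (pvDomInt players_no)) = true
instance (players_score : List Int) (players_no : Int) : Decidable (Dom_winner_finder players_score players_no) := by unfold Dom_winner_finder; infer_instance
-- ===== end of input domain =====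

-- B replaces A's single path-dependent running-max/tie-counter loop by distinct builtin passes
-- (all-equal test, max, first index of max); objective: simpler.


-- ===== PORT A =====
-- A's loop: running highest index + tie counter, then the draw test count == players_no-1.
def winner_finder (players_score : List Int) (players_no : Int) : Int :=
  let st := (PySem.List.pyRange 1 players_no 1).foldl
    (fun (p : Int × Int) i =>
      if PySem.List.pyGetD players_score p.1 0 = PySem.List.pyGetD players_score i 0 then
        (p.1, p.2 + 1)
      else if PySem.List.pyGetD players_score p.1 0 < PySem.List.pyGetD players_score i 0 then
        (i, p.2)
      else p)
    ((0 : Int), (0 : Int))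
  if st.2 = players_no - 1 then -1 else st.1

-- ===== PORT B =====
-- B: guard players_no < 1, all-equal test, then max and first index attaining it.
def winner_finder_alt (players_score : List Int) (players_no : Int) : Int :=
  if players_no < 1 then 0
  else if (PySem.List.pyRange 1 players_no 1).all
      (fun i => PySem.List.pyGetD players_score i 0 == PySem.List.pyGetD players_score 0 0) then -1
  else
    let m := (PySem.List.max?
      ((PySem.List.pyRange 0 players_no 1).map (fun i => PySem.List.pyGetD players_score i 0))
      (fun x => x)).getD 0
    ((PySem.List.pyRange 0 players_no 1).find?
      (fun i => PySem.List.pyGetD players_score i 0 == m)).getD 0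

-- ===== PRECONDITION & SPEC =====
-- Pre_ excludes exactly the inputs where Python A raises IndexError
-- (players_no ≥ 2 with fewer than players_no scores); B raises there identically.
def Pre_winner_finder (players_score : List Int) (players_no : Int) : Prop :=
  players_no ≤ (players_score.length : Int) ∨ players_no ≤ 1
instance (players_score : List Int) (players_no : Int) : Decidable (Pre_winner_finder players_score players_no) := by unfold Pre_winner_finder; infer_instance
def pvWitness_winner_finder : List Int × Int := ([3, 1, 2], 3)

def Spec_winner_finder (players_score : List Int) (players_no : Int) (out : Int) : Prop := out = winner_finder_alt players_score players_no
instance (players_score : List Int) (players_no : Int) (out : Int) : Decidable (Spec_winner_finder players_score players_no out) := by unfold Spec_winner_finder; infer_instance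

-- ===== CLAIM (what is proved, stated in full; the proofs are below) =====
def Claim_equal_winner_finder : Prop := ∀ (players_score : List Int) (players_no : Int), Dom_winner_finder players_score players_no → Pre_winner_finder players_score players_no → Spec_winner_finder players_score players_no (winner_finder players_score players_no)

-- ===== LEMMAS AND PROOFS =====

-- A's loop body, named for the proofs (definitionally the lambda in the port of A).
def wfStep (s : List Int) (p : Int × Int) (i : Int) : Int × Int :=
  if PySem.List.pyGetD s p.1 0 = PySem.List.pyGetD s i 0 then (p.1, p.2 + 1)
  else if PySem.List.pyGetD s p.1 0 < PySem.List.pyGetD s i 0 then (i, p.2)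
  else p

-- Invariant of A's loop after processing indices 1 .. t: the running index is the first
-- maximum of the prefix, the counter is at most t and equals t iff the prefix is constant.
theorem wf_inv (s : List Int) (t : Nat) :
    (0 ≤ ((PySem.List.pyRange 1 (1 + (t : Int)) 1).foldl (wfStep s) (0, 0)).1 ∧
      ((PySem.List.pyRange 1 (1 + (t : Int)) 1).foldl (wfStep s) (0, 0)).1 < 1 + (t : Int)) ∧
    (∀ i : Int, 0 ≤ i → i < 1 + (t : Int) →
      PySem.List.pyGetD s i 0 ≤ PySem.List.pyGetD s ((PySem.List.pyRange 1 (1 + (t : Int)) 1).foldl (wfStep s) (0, 0)).1 0) ∧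
    (∀ i : Int, 0 ≤ i → i < ((PySem.List.pyRange 1 (1 + (t : Int)) 1).foldl (wfStep s) (0, 0)).1 →
      PySem.List.pyGetD s i 0 < PySem.List.pyGetD s ((PySem.List.pyRange 1 (1 + (t : Int)) 1).foldl (wfStep s) (0, 0)).1 0) ∧
    ((PySem.List.pyRange 1 (1 + (t : Int)) 1).foldl (wfStep s) (0, 0)).2 ≤ (t : Int) ∧
    (((PySem.List.pyRange 1 (1 + (t : Int)) 1).foldl (wfStep s) (0, 0)).2 = (t : Int) ↔
      ∀ i : Int, 0 ≤ i → i < 1 + (t : Int) → PySem.List.pyGetD s i 0 = PySem.List.pyGetD s 0 0) := by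
  induction t with
  | zero =>
    rw [PySem.List.pyRange_one_eq_nil (by norm_num)]
    simp only [List.foldl_nil]
    refine ⟨⟨le_refl 0, by norm_num⟩, ?_, ?_, ?_, ?_⟩
    · intro i h0 h1
      have : i = 0 := by omega
      simp [this]
    · intro i h0 h1; omega
    · exact le_refl 0
    · constructor
      · intro _ i h0 h1
        have : i = 0 := by omega
        simp [this]
      · intro _; rfl
  | succ t ih =>
    have hrange : PySem.List.pyRange 1 (1 + ((t : Int) + 1)) 1
        = PySem.List.pyRange 1 (1 + (t : Int)) 1 ++ [1 + (t : Int)] := by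
      have := PySem.List.pyRange_one_succ_right (a := 1) (b := 1 + (t : Int)) (by omega)
      rw [show (1 : Int) + ((t : Int) + 1) = (1 + (t : Int)) + 1 by ring, this]
    push_cast
    rw [hrange, List.foldl_append]
    simp only [List.foldl_cons, List.foldl_nil]
    set st := (PySem.List.pyRange 1 (1 + (t : Int)) 1).foldl (wfStep s) (0, 0) with hst
    obtain ⟨⟨ha0, ha1⟩, hub, hfirst, hcle, hciff⟩ := ih
    unfold wfStep
    split_ifs with h1 h2
    · -- tie with running max: count increments, index unchanged
      refine ⟨⟨ha0, by omega⟩, ?_, ?_, by omega, ?_⟩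
      · intro i hi0 hi1
        rcases lt_or_eq_of_le (show i ≤ 1 + (t : Int) by omega) with h | h
        · exact hub i hi0 h
        · simp only [h]; omega
      · exact hfirst
      · constructor
        · intro hc i hi0 hi1
          have hold : st.2 = (t : Int) := by omega
          have hall := hciff.mp hold
          rcases lt_or_eq_of_le (show i ≤ 1 + (t : Int) by omega) with h | h
          · exact hall i hi0 h
          · have : PySem.List.pyGetD s st.1 0 = PySem.List.pyGetD s 0 0 := hall st.1 ha0 (by omega)
            rw [h, ← h1, this]
        · intro hall
          have hold : st.2 = (t : Int) := hciff.mpr (fun i hi0 hi1 => hall i hi0 (by omega))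
          omega
    · -- strictly larger: running index moves to the new position
      refine ⟨⟨by omega, by omega⟩, ?_, ?_, by omega, ?_⟩
      · intro i hi0 hi1
        rcases lt_or_eq_of_le (show i ≤ 1 + (t : Int) by omega) with h | h
        · exact le_of_lt (lt_of_le_of_lt (hub i hi0 h) h2)
        · simp [h]
      · intro i hi0 hi1
        exact lt_of_le_of_lt (hub i hi0 hi1) h2
      · constructor
        · intro hc; omega
        · intro hall
          exfalso
          have h0 : PySem.List.pyGetD s st.1 0 = PySem.List.pyGetD s 0 0 := hall st.1 ha0 (by omega)
          have hj : PySem.List.pyGetD s (1 + (t : Int)) 0 = PySem.List.pyGetD s 0 0 :=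
            hall _ (by omega) (by omega)
          rw [h0, hj] at h2; exact lt_irrefl _ h2
    · -- strictly smaller: state unchanged
      refine ⟨⟨ha0, by omega⟩, ?_, hfirst, by omega, ?_⟩
      · intro i hi0 hi1
        rcases lt_or_eq_of_le (show i ≤ 1 + (t : Int) by omega) with h | h
        · exact hub i hi0 h
        · rw [h]; omega
      · constructor
        · intro hc; omega
        · intro hall
          exfalso
          have h0 : PySem.List.pyGetD s st.1 0 = PySem.List.pyGetD s 0 0 := hall st.1 ha0 (by omega)
          have hj : PySem.List.pyGetD s (1 + (t : Int)) 0 = PySem.List.pyGetD s 0 0 :=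
            hall _ (by omega) (by omega)
          exact h1 (by rw [h0, hj])

-- find? on an ascending range returns the least index satisfying the predicate.
theorem find?_pyRange_first (p : Int → Bool) (b j : Int) (hjb : j < b) (hpj : p j = true) :
    ∀ (t : Nat) (a : Int), j - a = (t : Int) → a ≤ j →
      (∀ i, a ≤ i → i < j → p i = false) →
      (PySem.List.pyRange a b 1).find? p = some j := by
  intro t
  induction t with
  | zero =>
    intro a hta _ _
    have haj : a = j := by omega
    rw [haj, PySem.List.pyRange_one_cons hjb]
    simp [List.find?, hpj]
  | succ t ih =>
    intro a hta haj hmin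
    have haj' : a < j := by omega
    rw [PySem.List.pyRange_one_cons (by omega)]
    have hpa : p a = false := hmin a (le_refl a) haj'
    simp only [List.find?, hpa]
    exact ih (a + 1) (by omega) (by omega) (fun i h1 h2 => hmin i (by omega) h2)

theorem winner_finder_spec : Claim_equal_winner_finder := by
  intro s n _hdom hpre
  unfold Spec_winner_finder winner_finder winner_finder_alt
  by_cases hn1 : n < 1
  · -- empty loop, count 0 ≠ n-1
    rw [PySem.List.pyRange_one_eq_nil (by omega)]
    simp only [List.foldl_nil]
    rw [if_neg (by omega), if_pos hn1]
  · by_cases hn2 : n = 1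
    · subst hn2
      rw [PySem.List.pyRange_one_eq_nil (by omega)]
      simp only [List.foldl_nil, List.all_nil]
      norm_num
    · -- main case: 2 ≤ n ≤ length
      have hn : 2 ≤ n := by omega
      have hlen : n ≤ (s.length : Int) := by
        rcases hpre with h | h
        · exact h
        · omega
      obtain ⟨t, ht⟩ : ∃ t : Nat, n = 1 + (t : Int) := ⟨(n - 1).toNat, by omega⟩
      subst ht
      obtain ⟨⟨ha0, ha1⟩, hub, hfirst, hcle, hciff⟩ := wf_inv s t
      set st := (PySem.List.pyRange 1 (1 + (t : Int)) 1).foldl (wfStep s) (0, 0) with hst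
      have hfold : (PySem.List.pyRange 1 (1 + (t : Int)) 1).foldl
          (fun (p : Int × Int) i =>
            if PySem.List.pyGetD s p.1 0 = PySem.List.pyGetD s i 0 then (p.1, p.2 + 1)
            else if PySem.List.pyGetD s p.1 0 < PySem.List.pyGetD s i 0 then (i, p.2)
            else p) ((0 : Int), (0 : Int)) = st := rfl
      rw [hfold]
      rw [if_neg (show ¬(1 + (t : Int) < 1) by omega)]
      have hallspec : ((PySem.List.pyRange 1 (1 + (t : Int)) 1).all
          (fun i => PySem.List.pyGetD s i 0 == PySem.List.pyGetD s 0 0) = true) ↔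
          (∀ i : Int, 0 ≤ i → i < 1 + (t : Int) →
            PySem.List.pyGetD s i 0 = PySem.List.pyGetD s 0 0) := by
        rw [List.all_eq_true]
        constructor
        · intro h i hi0 hi1
          by_cases hiz : i = 0
          · rw [hiz]
          · have := h i (by rw [PySem.List.mem_pyRange_one]; omega)
            exact beq_iff_eq.mp (by simpa using this)
        · intro h i hi
          rw [PySem.List.mem_pyRange_one] at hi
          simpa using beq_iff_eq.mpr (h i (by omega) hi.2)
      by_cases hdraw : st.2 = 1 + (t : Int) - 1
      · -- draw: counter full iff all scores equal
        rw [if_pos hdraw]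
        have hall : ∀ i : Int, 0 ≤ i → i < 1 + (t : Int) →
            PySem.List.pyGetD s i 0 = PySem.List.pyGetD s 0 0 :=
          hciff.mp (by omega)
        rw [if_pos (hallspec.mpr hall)]
      · rw [if_neg hdraw]
        have hnall : ¬ ((PySem.List.pyRange 1 (1 + (t : Int)) 1).all
            (fun i => PySem.List.pyGetD s i 0 == PySem.List.pyGetD s 0 0) = true) := by
          intro h
          exact hdraw (by have := hciff.mpr (hallspec.mp h); omega)
        rw [if_neg hnall]
        show st.1 = ((PySem.List.pyRange 0 (1 + (t : Int)) 1).find?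
            (fun i => PySem.List.pyGetD s i 0 ==
              (PySem.List.max? ((PySem.List.pyRange 0 (1 + (t : Int)) 1).map
                (fun i => PySem.List.pyGetD s i 0)) (fun x => x)).getD 0)).getD 0
        set L := (PySem.List.pyRange 0 (1 + (t : Int)) 1).map
          (fun i => PySem.List.pyGetD s i 0) with hL
        have hLne : L ≠ [] := by
          rw [hL]
          intro h
          have := congrArg List.length h
          simp [PySem.List.length_pyRange_one] at this
          omega
        obtain ⟨m, hm⟩ : ∃ m, PySem.List.max? L (fun x => x) = some m := by
          rcases h : PySem.List.max? L (fun x => x) with _ | m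
          · exact absurd ((PySem.List.max?_eq_none_iff _ _).mp h) hLne
          · exact ⟨m, rfl⟩
        have hmmem : m ∈ L := PySem.List.max?_mem hm
        have hmmax : ∀ y ∈ L, y ≤ m := by
          intro y hy
          exact PySem.List.max?_isMax hm y hy
        have hmval : m = PySem.List.pyGetD s st.1 0 := by
          apply le_antisymm
          · rw [hL] at hmmem
            obtain ⟨i, hi, hival⟩ := List.mem_map.mp hmmem
            rw [PySem.List.mem_pyRange_one] at hi
            rw [← hival]
            exact hub i hi.1 hi.2
          · apply hmmax
            rw [hL]
            exact List.mem_map.mpr ⟨st.1, by rw [PySem.List.mem_pyRange_one]; omega, rfl⟩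
        rw [hm]
        simp only [Option.getD_some]
        have hfind : (PySem.List.pyRange 0 (1 + (t : Int)) 1).find?
            (fun i => PySem.List.pyGetD s i 0 == m) = some st.1 := by
          apply find?_pyRange_first _ _ _ ha1
            (by simpa using beq_iff_eq.mpr hmval.symm) st.1.toNat 0 (by omega) ha0
          intro i hi0 hi1
          rw [hmval]
          simpa using ne_of_lt (hfirst i hi0 hi1)
        simp only [hfind, Option.getD_some]
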